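-- pv_equiv track=rewrite | github.com/cutehammond772/problem-solving-archive | 백준/Gold/24229. 모두싸인 출근길/모두싸인 출근길.py | solve
-- ===== SOURCE A (Python) =====
-- def combine(Q):
--   result = []
--
--   # 판자의 위치(L, R)을 기준으로 정렬
--   Q.sort()
--
--   # 이어진 판자의 계산
--   min_left, max_right = 0, 0
--
--   for L, R in Q:
--     # 더이상 판자가 이어지지 않는 경우
--     if max_right < L:
--       result.append((min_left, max_right))
--       min_left = max_right = L
--
--     # 판자로 이어지는 경우
--     min_left = min(min_left, L)
--     max_right = max(max_right, R)
--
--   result.append((min_left, max_right))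
--
--   return result
--
-- def solve(Q):
--   Q = combine(Q)
--   max_dist, max_reach = 0, 0
--
--   for L, R in Q:
--     # 이전 판자에서 도달이 불가능한 경우
--     if max_dist < L:
--       break
--
--     max_reach = R
--     max_dist = max(max_dist, R + (R - L))
--
--   return max_reach
-- ===== SOURCE B (Python) =====
-- def solve(Q):
--     # Single fused pass: merge state and reach state maintained together.
--     # Note: return-value equivalence only; like A, this sorts Q in place.
--     Q.sort()
--     min_left = max_right = 0
--     max_dist = max_reach = 0
--     for L, R in Q:
--         if max_right < L:
--             # current merged group is closed: run the reach step on it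
--             if max_dist < min_left:
--                 return max_reach
--             max_reach = max_right
--             max_dist = max(max_dist, 2 * max_right - min_left)
--             min_left = max_right = L
--         min_left = min(min_left, L)
--         max_right = max(max_right, R)
--     # final group's reach step
--     if max_dist < min_left:
--         return max_reach
--     return max_right
-- ===== Notes on version B (the rewrite author's own statement) =====
-- stated objective: simpler
-- what changed: Fuses A's two phases (build the merged-interval list, then scan it for reachability) into one pass over the sorted input that keeps merge state and reach state together, never materializing the intermediate list.
import Mathlib
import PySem

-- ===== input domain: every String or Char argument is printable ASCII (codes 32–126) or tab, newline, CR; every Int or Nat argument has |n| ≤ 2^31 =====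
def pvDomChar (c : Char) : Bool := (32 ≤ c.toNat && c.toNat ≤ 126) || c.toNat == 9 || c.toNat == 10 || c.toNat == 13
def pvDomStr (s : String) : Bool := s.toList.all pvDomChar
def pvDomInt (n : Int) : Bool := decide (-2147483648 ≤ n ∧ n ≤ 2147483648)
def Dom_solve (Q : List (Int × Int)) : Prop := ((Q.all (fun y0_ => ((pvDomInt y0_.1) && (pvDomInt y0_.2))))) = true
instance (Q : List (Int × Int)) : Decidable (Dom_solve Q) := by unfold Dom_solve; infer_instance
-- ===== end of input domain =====

-- B fuses A's two phases (merge pass building a list, then reach scan) into one pass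
-- over the sorted input; return-value equivalence only (both Pythons sort Q in place).

-- ===== PORT A =====
-- combine's loop: foldl over the sorted list, state = (result, min_left, max_right)
def combineStep (acc : List (Int × Int) × Int × Int) (p : Int × Int) :
    List (Int × Int) × Int × Int :=
  let (res, ml, mr) := acc
  let (L, R) := p
  let (res', ml', mr') := if mr < L then (res ++ [(ml, mr)], L, L) else (res, ml, mr)
  (res', min ml' L, max mr' R)

def combine (Q : List (Int × Int)) : List (Int × Int) :=
  let s := (PySem.List.sorted2 Q (fun x => x.1) (fun x => x.2) false).foldl combineStep ([], 0, 0)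
  s.1 ++ [(s.2.1, s.2.2)]

-- solve's for-loop with break: structural recursion, state = (max_dist, max_reach)
def reachLoop : List (Int × Int) → Int → Int → Int
  | [], _, maxReach => maxReach
  | (L, R) :: t, maxDist, maxReach =>
      if maxDist < L then maxReach
      else reachLoop t (max maxDist (R + (R - L))) R

def solve (Q : List (Int × Int)) : Int :=
  reachLoop (combine Q) 0 0

-- ===== PORT B =====
-- one fused loop; early `return max_reach` ports as stopping the recursion
def fusedLoop : List (Int × Int) → Int → Int → Int → Int → Int
  | [], ml, mr, md, mre => if md < ml then mre else mr
  | (L, R) :: t, ml, mr, md, mre =>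
      if mr < L then
        if md < ml then mre
        else
          let mre' := mr
          let md' := max md (2 * mr - ml)
          let ml' := L
          let mr' := L
          fusedLoop t (min ml' L) (max mr' R) md' mre'
      else fusedLoop t (min ml L) (max mr R) md mre

def solve_alt (Q : List (Int × Int)) : Int :=
  fusedLoop (PySem.List.sorted2 Q (fun x => x.1) (fun x => x.2) false) 0 0 0 0

-- ===== PRECONDITION & SPEC =====
def Spec_solve (Q : List (Int × Int)) (out : Int) : Prop := out = solve_alt Q
instance (Q : List (Int × Int)) (out : Int) : Decidable (Spec_solve Q out) := by unfold Spec_solve; infer_instance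

-- ===== CLAIM (what is proved, stated in full; the proofs are below) =====
def Claim_equal_solve : Prop := ∀ (Q : List (Int × Int)), Dom_solve Q → Spec_solve Q (solve Q)

-- ===== LEMMAS AND PROOFS =====

-- A's combine fold: the accumulated result list only grows by appending
theorem combineFold_res_append (l : List (Int × Int)) (res : List (Int × Int)) (ml mr : Int) :
    l.foldl combineStep (res, ml, mr) =
      (res ++ (l.foldl combineStep ([], ml, mr)).1, (l.foldl combineStep ([], ml, mr)).2) := by
  induction l generalizing res ml mr with
  | nil => simp
  | cons p t ih =>
      obtain ⟨L, R⟩ := p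
      by_cases h : mr < L
      · simp only [List.foldl_cons, combineStep, h, if_pos]
        rw [ih (res ++ [(ml, mr)]), ih ([] ++ [(ml, mr)])]
        simp
      · simp only [List.foldl_cons, combineStep, h, if_neg, not_false_iff]
        exact ih res _ _

-- main invariant: running A's reach scan on the groups emitted by combine's fold
-- equals B's fused loop on the raw (sorted) list, for any shared state
theorem reach_fused (l : List (Int × Int)) (ml mr md mre : Int) :
    reachLoop ((l.foldl combineStep ([], ml, mr)).1 ++
        [((l.foldl combineStep ([], ml, mr)).2.1, (l.foldl combineStep ([], ml, mr)).2.2)]) md mre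
      = fusedLoop l ml mr md mre := by
  induction l generalizing ml mr md mre with
  | nil =>
      simp [reachLoop, fusedLoop]
  | cons p t ih =>
      obtain ⟨L, R⟩ := p
      by_cases h : mr < L
      · simp only [List.foldl_cons, combineStep, h, if_pos]
        rw [combineFold_res_append]
        simp only [List.nil_append, List.cons_append, fusedLoop, h, if_pos]
        by_cases h2 : md < ml
        · simp [reachLoop, h2]
        · have e2 : mr + (mr - ml) = 2 * mr - ml := by ring
          rw [reachLoop, if_neg (by omega), e2, if_neg h2]
          exact ih _ _ _ _
      · simp only [List.foldl_cons, combineStep, h, if_neg, not_false_iff, fusedLoop]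
        exact ih _ _ _ _

-- ===== VERDICT (by name: the statement is the Claim_ definition above) =====
theorem solve_spec : Claim_equal_solve := by
  intro Q _
  show solve Q = solve_alt Q
  unfold solve solve_alt combine
  exact reach_fused _ 0 0 0 0
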